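/-
  jsmn_s.bin: `jsmn_run` (65 bytes at 100643H, 23 instructions, two calls): `jsmn_parser p; jsmn_init(&p); return jsmn_parse(&p, js, len,
  tokens, num_tokens)`. The parser struct lives in jsmn_run's own frame (`&p = rsp0 - 44`). The callees are used through their contracts.
-/
import Prog.Jsmn.RunLemmas
import Prog.Jsmn.CodeS

namespace X86
namespace J6
namespace S
open X86.User (CodeAt RegsKept Span FlagsOK Layout toNat_add_ofNat toNat_ofNat_lt' add_ofNat_add)
open Jsmn JsmnSBytes

set_option maxRecDepth 100000
set_option maxHeartbeats 4000000
set_option linter.unusedSimpArgs false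
set_option linter.unusedVariables false

/-- The fields of `binS` in a goal (the callees' preconditions are stated with them), and the registers of the view at the call. -/
macro "runs_lit" : tactic => `(tactic| simp (implicitDefEqProofs := false) only [binS_useRun, binS_useParse, binS_cfg, binS_image,
  JsmnSBytes.image_bytes_length, X86.User.State.reg_setReg, X86.User.State.reg_setRip, X86.User.State.reg_setFlags, X86.User.State.reg_setMem, reduceCtorEq,
  if_true, if_false])

variable {n : User.Layout} {v0 : User.State} {ret jsA tb : Word} {js : List UInt8} {numTokens : Nat} {toks toks' : Option Tokens} {fuel : Nat} {r : Int}
  {p' : Parser}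

theorem run_reach (sf : SafeFacts binS.cfg) (hinit : InitSpec binS n) (hparse : ParseSpec binS n)
    (hp : RunPre binS n v0 ret jsA tb js numTokens toks)
    (hm : parseFuel binS.cfg fuel js Parser.init toks numTokens = some (r, p', toks')) :
    Reach n v0 (fun v => CallPost v0 binS.useRun [(tb.toNat, tb.toNat + toksBytes binS.cfg numTokens toks)] ret v ∧ RetInt v r ∧
      ToksArg binS.cfg v.mem tb numTokens toks') := by
  have hW := hp.toksW
  have hinv := sf.init toks numTokens hp.init
  have hnt : numTokens < 2 ^ 32 := hp.init.1
  have htoksR := hp.toksR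
  have htoksArg := hp.toksArg
  v3_open hp hW
  clear hp_toksR
  j6_bin
  have hcode := JsmnS.tjs_jsmn_run_code hp_call_img
  v3_walk hcode hp.call.fetch []
  refine Reach.trans (hinit _ 0x100663 (v0.reg .rsp - 44) ?pre) ?_
  case pre =>
    exact ⟨show CallPre n 0x100000 image_bytes 0x10062e 0 0x100663 _ by v3_callpre hp_call_img hp.call, by v3_regnorm,
      ⟨by v3_omega, by v3_omega, by runs_lit; v3_omega, by runs_lit; v3_omega⟩⟩
  intro v2 hpostI
  obtain ⟨hpostI1, hparser2⟩ := hpostI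
  v3_open hpostI1
  have hkI := hpostI1.kept
  v3_viewnorm at hpostI1_rsp hpostI1_same hpostI1_rip
  have hsp44 : (v0.reg .rsp - 44).toNat = (v0.reg .rsp).toNat - 44 := by v3_omega
  have hsp56 : (v0.reg .rsp - 56).toNat = (v0.reg .rsp).toNat - 56 := by v3_omega
  rw [hsp44, hsp56] at hpostI1_same
  have himg2 : CodeAt v2.mem 0x100000 image_bytes := by v3_frame hp_call_img
  have hcode2 := JsmnS.tjs_jsmn_run_code himg2
  clear hcodeW
  have hrbx : v2.reg .rbx = jsA := by rw [hkI.get .rbx rfl]; v3_regnorm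
  have hrbp : v2.reg .rbp = UInt64.ofNat js.length := by rw [hkI.get .rbp rfl]; v3_regnorm
  have hr12 : v2.reg .r12 = tb := by rw [hkI.get .r12 rfl]; v3_regnorm
  have hr13 : v2.reg .r13 = Word.low .w32 (v0.reg .rcx) := by rw [hkI.get .r13 rfl]; v3_regnorm
  v3_walk hcode2 hp.call.fetch []
  refine Reach.trans (hparse _ 0x100679 (v0.reg .rsp - 44) jsA tb js numTokens Parser.init toks fuel r p' toks' ?pre ?r8 hinv hm) ?_
  case r8 => v3_regnorm; rw [Word.low_idem]; exact hp_rcx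
  case pre =>
    have hsp1 : (v0.reg .rsp).toNat - 56 + 8 ≤ (v0.reg .rsp).toNat := by v3_omega
    have hsp2 : (v0.reg .rsp).toNat - 152 ≤ (v0.reg .rsp).toNat - 56 - 96 := by v3_omega
    refine ⟨show CallPre n 0x100000 image_bytes 0x1002a9 96 0x100679 _ by v3_callpre himg2 hp.call, by v3_regnorm, by v3_regnorm, by v3_regnorm,
      by v3_regnorm, hnt, hp_jslt, by v3_frame hp_text, by v3_frame hparser2, by show ToksArg Config.strictLinks _ _ _ _; v3_frame htoksArg,
      ⟨⟨by v3_omega, by v3_omega, by runs_lit; v3_omega, by runs_lit; v3_omega⟩,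
       hp.jsR.callee (by runs_lit; rw [hsp56]; exact hsp1) (by runs_lit; rw [hsp56]; exact hsp2),
       htoksR.imp_right fun hR => hR.callee (by runs_lit; rw [hsp56]; exact hsp1) (by runs_lit; rw [hsp56]; exact hsp2),
       by v3_omega, by runs_lit; v3_omega, by runs_lit; exact hp_jsToks⟩⟩
  intro v4 hpostP
  have hrax := hpostP.rax
  have htoks4 := hpostP.toks
  have hpostP1 := hpostP.ret
  clear hpostP
  v3_open hpostP1
  have hkP := hpostP1.kept
  v3_viewnorm at hpostP1_rsp hpostP1_same hpostP1_rip
  simp (implicitDefEqProofs := false) only [binS_useParse, binS_cfg, dataWins] at hpostP1_same htoks4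
  rw [hsp44, hsp56] at hpostP1_same
  have himg4 : CodeAt v4.mem 0x100000 image_bytes := by v3_frame himg2
  have hcode4 := JsmnS.tjs_jsmn_run_code himg4
  clear hcodeW
  unfold RetInt at hrax
  v3_walk hcode4 hp.call.fetch [hp_call_retAddr, hp_call_retlt]
  refine Reach.done ⟨⟨by simp, by simp, calleeSaved_of_six (by v3_regnorm) (by v3_regnorm) (by v3_regnorm) (by v3_regnorm)
    (by v3_regnorm; rw [hkP.get .r14 rfl]; v3_regnorm; rw [hkI.get .r14 rfl]; v3_regnorm)
    (by v3_regnorm; rw [hkP.get .r15 rfl]; v3_regnorm; rw [hkI.get .r15 rfl]; v3_regnorm), ?_⟩, ?_, ?_⟩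
  · v3_same
  · unfold RetInt; v3_regnorm; exact hrax
  · v3_memnorm; exact htoks4

/-- **`jsmn_run` of jsmn_s.bin computes `Jsmn.parseFuel` from `Parser.init`.** -/
theorem run_spec (sf : SafeFacts binS.cfg) (hinit : InitSpec binS n) (hparse : ParseSpec binS n) : RunSpec binS n :=
  fun _ _ _ _ _ _ _ _ _ _ _ hp hm => run_reach sf hinit hparse hp hm

end S
end J6
end X86
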